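-- pv_equiv track=rewrite | github.com/yangduhi/IIHS_SOL | scripts/tools/analytics/build_signal_feature_batch.py | view_for_standard_name
-- ===== SOURCE A (Python) =====
-- VIEW_CHANNELS = {
--     "pulse": (
--         "vehicle_longitudinal_accel_g",
--         "vehicle_lateral_accel_g",
--         "vehicle_vertical_accel_g",
--         "vehicle_resultant_accel_g",
--         "vehicle_longitudinal_accel_g__jerk",
--         "vehicle_resultant_accel_g__jerk",
--         "vehicle_longitudinal_accel_g__delta_v",
--         "vehicle_resultant_accel_g__delta_v",
--     ),
--     "occupant": (
--         "seat_mid_deflection_mm",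
--         "seat_inner_deflection_mm",
--         "seat_mid_deflection_mm__rate",
--         "seat_inner_deflection_mm__rate",
--     ),
--     "lower_extremity": (
--         "foot_left_x_accel_g",
--         "foot_left_z_accel_g",
--         "foot_right_x_accel_g",
--         "foot_right_z_accel_g",
--         "foot_left_x_accel_g__jerk",
--         "foot_right_x_accel_g__jerk",
--     ),
-- }
--
-- def standard_base_name(standard_name: str) -> str:
--     for suffix in ("__jerk", "__rate", "__delta_v"):
--         if standard_name.endswith(suffix):
--             return standard_name[: -len(suffix)]
--     return standard_name
--
-- def view_for_standard_name(standard_name: str, feature_name: str) -> str | None: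
--     if standard_name == "cross_channel_lag":
--         if "seat_" in feature_name:
--             return "occupant"
--         if "foot_" in feature_name or "lower_" in feature_name:
--             return "lower_extremity"
--         return "pulse"
--     for view_name, channels in VIEW_CHANNELS.items():
--         if standard_name in channels:
--             return view_name
--     base_name = standard_base_name(standard_name)
--     for view_name, channels in VIEW_CHANNELS.items():
--         if base_name in channels:
--             return view_name
--     return None
-- ===== SOURCE B (Python) =====
-- VIEW_CHANNELS = {
--     "pulse": (
--         "vehicle_longitudinal_accel_g",
--         "vehicle_lateral_accel_g",
--         "vehicle_vertical_accel_g",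
--         "vehicle_resultant_accel_g",
--         "vehicle_longitudinal_accel_g__jerk",
--         "vehicle_resultant_accel_g__jerk",
--         "vehicle_longitudinal_accel_g__delta_v",
--         "vehicle_resultant_accel_g__delta_v",
--     ),
--     "occupant": (
--         "seat_mid_deflection_mm",
--         "seat_inner_deflection_mm",
--         "seat_mid_deflection_mm__rate",
--         "seat_inner_deflection_mm__rate",
--     ),
--     "lower_extremity": (
--         "foot_left_x_accel_g",
--         "foot_left_z_accel_g",
--         "foot_right_x_accel_g",
--         "foot_right_z_accel_g",
--         "foot_left_x_accel_g__jerk",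
--         "foot_right_x_accel_g__jerk",
--     ),
-- }
--
-- # Reverse index built once: channel -> view.  The table is closed under
-- # suffix-stripping (each channel's base name is a channel of the same view),
-- # so one lookup of the normalized (base) name suffices: no exact-then-base
-- # double pass is needed.
-- CHANNEL_TO_VIEW = {
--     channel: view
--     for view, channels in VIEW_CHANNELS.items()
--     for channel in channels
-- }
--
-- def standard_base_name(standard_name: str) -> str:
--     for suffix in ("__jerk", "__rate", "__delta_v"):
--         if standard_name.endswith(suffix):
--             return standard_name[: -len(suffix)]
--     return standard_name
--
-- def view_for_standard_name(standard_name: str, feature_name: str) -> str | None: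
--     if standard_name == "cross_channel_lag":
--         if "seat_" in feature_name:
--             return "occupant"
--         if "foot_" in feature_name or "lower_" in feature_name:
--             return "lower_extremity"
--         return "pulse"
--     return CHANNEL_TO_VIEW.get(standard_base_name(standard_name))
-- ===== Notes on version B (the rewrite author's own statement) =====
-- stated objective: simpler
-- what changed: B drops A's exact-then-base double scan entirely: it normalizes the name with standard_base_name first and does a single lookup in a reverse index CHANNEL_TO_VIEW, which is correct because the table is closed under suffix-stripping (every channel's base name is a channel of the same view); the cross_channel_lag branch is kept.
import Mathlib
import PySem

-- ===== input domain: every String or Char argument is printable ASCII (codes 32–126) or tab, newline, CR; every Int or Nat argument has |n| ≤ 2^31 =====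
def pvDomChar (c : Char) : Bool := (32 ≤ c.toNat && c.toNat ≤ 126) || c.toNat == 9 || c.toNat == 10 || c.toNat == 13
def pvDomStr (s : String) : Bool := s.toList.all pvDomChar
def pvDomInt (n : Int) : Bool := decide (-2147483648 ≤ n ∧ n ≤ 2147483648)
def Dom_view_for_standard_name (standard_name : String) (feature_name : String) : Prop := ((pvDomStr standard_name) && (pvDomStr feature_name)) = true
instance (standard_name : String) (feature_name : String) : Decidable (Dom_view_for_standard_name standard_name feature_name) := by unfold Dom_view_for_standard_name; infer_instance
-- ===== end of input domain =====

-- B replaces A's exact-then-base double scan by one lookup of the normalized (base) name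
-- in a reverse index, valid because the table is closed under suffix-stripping (simpler).

-- shared module data: VIEW_CHANNELS as insertion-ordered (view, channels) pairs
def VIEW_CHANNELS : List (String × List String) :=
  [("pulse",
     ["vehicle_longitudinal_accel_g", "vehicle_lateral_accel_g",
      "vehicle_vertical_accel_g", "vehicle_resultant_accel_g",
      "vehicle_longitudinal_accel_g__jerk", "vehicle_resultant_accel_g__jerk",
      "vehicle_longitudinal_accel_g__delta_v", "vehicle_resultant_accel_g__delta_v"]),
   ("occupant",
     ["seat_mid_deflection_mm", "seat_inner_deflection_mm",
      "seat_mid_deflection_mm__rate", "seat_inner_deflection_mm__rate"]),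
   ("lower_extremity",
     ["foot_left_x_accel_g", "foot_left_z_accel_g",
      "foot_right_x_accel_g", "foot_right_z_accel_g",
      "foot_left_x_accel_g__jerk", "foot_right_x_accel_g__jerk"])]

-- shared module helper standard_base_name (used verbatim by both Pythons)
def standard_base_name (standard_name : String) : String :=
  if PySem.Str.endswith standard_name "__jerk" then
    String.ofList (PySem.List.slice standard_name.toList none (some (-6)))
  else if PySem.Str.endswith standard_name "__rate" then
    String.ofList (PySem.List.slice standard_name.toList none (some (-6)))
  else if PySem.Str.endswith standard_name "__delta_v" then
    String.ofList (PySem.List.slice standard_name.toList none (some (-9)))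
  else standard_name

-- ===== PORT A =====
-- A's scanning loop: 'for view_name, channels in VIEW_CHANNELS.items(): if name in channels: return view_name'
def scanViews : List (String × List String) → String → Option String
  | [], _ => none
  | (view_name, channels) :: rest, s =>
      if channels.contains s then some view_name else scanViews rest s

def view_for_standard_name (standard_name : String) (feature_name : String) : Option String :=
  if standard_name == "cross_channel_lag" then
    if PySem.Str.isIn "seat_" feature_name then some "occupant"
    else if PySem.Str.isIn "foot_" feature_name || PySem.Str.isIn "lower_" feature_name then
      some "lower_extremity"
    else some "pulse"
  else
    match scanViews VIEW_CHANNELS standard_name with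
    | some view_name => some view_name
    | none => scanViews VIEW_CHANNELS (standard_base_name standard_name)

-- ===== PORT B =====
-- reverse index built once: {channel: view for view, channels in VIEW_CHANNELS.items() for channel in channels}
def CHANNEL_TO_VIEW : PySem.Dict String String :=
  PySem.Dict.ofList
    (VIEW_CHANNELS.flatMap (fun p => p.2.map (fun channel => (channel, p.1))))

def view_for_standard_name_alt (standard_name : String) (feature_name : String) : Option String :=
  if standard_name == "cross_channel_lag" then
    if PySem.Str.isIn "seat_" feature_name then some "occupant"
    else if PySem.Str.isIn "foot_" feature_name || PySem.Str.isIn "lower_" feature_name then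
      some "lower_extremity"
    else some "pulse"
  else
    CHANNEL_TO_VIEW.get? (standard_base_name standard_name)

-- ===== PRECONDITION & SPEC =====
def Spec_view_for_standard_name (standard_name : String) (feature_name : String) (out : Option String) : Prop := out = view_for_standard_name_alt standard_name feature_name
instance (standard_name : String) (feature_name : String) (out : Option String) : Decidable (Spec_view_for_standard_name standard_name feature_name out) := by unfold Spec_view_for_standard_name; infer_instance

-- ===== CLAIM (what is proved, stated in full; the proofs are below) =====
def Claim_equal_view_for_standard_name : Prop := ∀ (standard_name : String) (feature_name : String), Dom_view_for_standard_name standard_name feature_name → Spec_view_for_standard_name standard_name feature_name (view_for_standard_name standard_name feature_name)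

-- ===== LEMMAS AND PROOFS =====

-- the reverse index is the flat (channel, view) list as a literal dict (all 18 keys are fresh)
set_option maxHeartbeats 4000000 in
theorem ctov_eq : CHANNEL_TO_VIEW =
    PySem.Dict.mk (VIEW_CHANNELS.flatMap (fun p => p.2.map (fun channel => (channel, p.1)))) := by
  decide

-- one group of the flat dict looks up like one membership test of A's scan
theorem get?_mk_group (v : String) (chans : List String) (tail : List (String × String)) (s : String) :
    (PySem.Dict.mk ((chans.map (fun c => (c, v))) ++ tail)).get? s =
      if chans.contains s then some v else (PySem.Dict.mk tail).get? s := by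
  induction chans with
  | nil => simp
  | cons c cs ih =>
      by_cases h : c = s
      · subst h; simp [PySem.Dict.get?_mk_cons]
      · simp [PySem.Dict.get?_mk_cons, h, ih, Ne.symm h]

-- A's scan over any grouping equals lookup in its flattened reverse index
theorem scan_general (groups : List (String × List String)) (s : String) :
    scanViews groups s =
      (PySem.Dict.mk (groups.flatMap (fun p => p.2.map (fun channel => (channel, p.1))))).get? s := by
  induction groups with
  | nil => simp [scanViews, PySem.Dict.get?]
  | cons p rest ih =>
      obtain ⟨v, chans⟩ := p
      simp [scanViews, get?_mk_group, ih]

theorem scan_eq_lookup (s : String) :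
    scanViews VIEW_CHANNELS s = CHANNEL_TO_VIEW.get? s := by
  rw [ctov_eq, scan_general]

-- closure: if the exact name scans to some view, its base name scans to the same view
set_option maxHeartbeats 4000000 in
theorem scan_base_closed (s : String) (v : String)
    (h : scanViews VIEW_CHANNELS s = some v) :
    scanViews VIEW_CHANNELS (standard_base_name s) = some v := by
  simp only [VIEW_CHANNELS, scanViews] at h
  split_ifs at h with h1 h2 h3 <;>
    simp only [Option.some.injEq] at h <;> subst h
  · -- s is a pulse channel
    simp only [List.contains_eq_mem, List.mem_cons, List.not_mem_nil, or_false,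
      decide_eq_true_eq] at h1
    rcases h1 with h | h | h | h | h | h | h | h <;> subst h <;> decide
  · simp only [List.contains_eq_mem, List.mem_cons, List.not_mem_nil, or_false,
      decide_eq_true_eq] at h2
    rcases h2 with h | h | h | h <;> subst h <;> decide
  · simp only [List.contains_eq_mem, List.mem_cons, List.not_mem_nil, or_false,
      decide_eq_true_eq] at h3
    rcases h3 with h | h | h | h | h | h <;> subst h <;> decide

-- ===== VERDICT (by name: the statement is the Claim_ definition above) =====
theorem view_for_standard_name_spec : Claim_equal_view_for_standard_name := by
  intro s f _
  unfold Spec_view_for_standard_name view_for_standard_name view_for_standard_name_alt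
  by_cases h : s == "cross_channel_lag"
  · simp [h]
  · simp only [h, Bool.false_eq_true, if_false]
    cases hscan : scanViews VIEW_CHANNELS s with
    | none => rw [scan_eq_lookup]
    | some v => rw [← scan_eq_lookup, scan_base_closed s v hscan]
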